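-- pv_equiv track=rewrite | github.com/openvinotoolkit/open_model_zoo | demos/python_demos/common/ie_config_helper.py | format_device_string
-- ===== SOURCE A (Python) =====
-- def format_device_string(device_string):
--     formatted_string = ''
--     change_case = 1
--
--     for i in range(len(device_string)):
--         # For the special case of MYRIAD device names in "MYRIAD.0.0-ma0000" format
--         prefix = device_string[i:i+2]
--         if prefix == 'ma':
--             change_case = 0
--         elif prefix == 'MA' or prefix == 'Ma' or prefix == 'mA':
--             change_case = -1
--         elif change_case != 1 and device_string[i] == ',':
--             change_case = 1
--
--         if change_case == 1:
--             formatted_string += device_string[i].upper()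
--         elif change_case == -1:
--             formatted_string += device_string[i].lower()
--         elif change_case == 0:
--             formatted_string += device_string[i]
--
--     return formatted_string
-- ===== SOURCE B (Python) =====
-- def _apply(mode, chunk):
--     if mode == 1:
--         return chunk.upper()
--     if mode == -1:
--         return chunk.lower()
--     return chunk
--
--
-- def format_device_string(device_string):
--     s = device_string
--     # Pass 1: collect the positions where the case-state changes, with the
--     # state each one sets: the pair 'ma' sets preserve (0), 'MA'/'Ma'/'mA'
--     # sets lower (-1), and a comma sets upper (1).
--     marks = []
--     for i in range(len(s)):
--         pair = s[i:i+2]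
--         if pair == 'ma':
--             marks.append((i, 0))
--         elif pair in ('MA', 'Ma', 'mA'):
--             marks.append((i, -1))
--         elif s[i] == ',':
--             marks.append((i, 1))
--     # Pass 2: transform each chunk between consecutive marks as a whole.
--     out = []
--     prev, mode = 0, 1
--     for m, md in marks:
--         out.append(_apply(mode, s[prev:m]))
--         prev, mode = m, md
--     out.append(_apply(mode, s[prev:]))
--     return ''.join(out)
-- ===== Notes on version B (the rewrite author's own statement) =====
-- stated objective: alternative
-- what changed: B replaces A's per-character state machine (one pass, appending one transformed character at a time) by a two-pass algorithm: pass 1 collects the positions where the case-state changes (the 'ma'/'MA'/'Ma'/'mA' pairs and the commas) together with the state each one sets, pass 2 slices the string at those marks and uppercases/lowercases/copies each chunk as a whole.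
import Mathlib
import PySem

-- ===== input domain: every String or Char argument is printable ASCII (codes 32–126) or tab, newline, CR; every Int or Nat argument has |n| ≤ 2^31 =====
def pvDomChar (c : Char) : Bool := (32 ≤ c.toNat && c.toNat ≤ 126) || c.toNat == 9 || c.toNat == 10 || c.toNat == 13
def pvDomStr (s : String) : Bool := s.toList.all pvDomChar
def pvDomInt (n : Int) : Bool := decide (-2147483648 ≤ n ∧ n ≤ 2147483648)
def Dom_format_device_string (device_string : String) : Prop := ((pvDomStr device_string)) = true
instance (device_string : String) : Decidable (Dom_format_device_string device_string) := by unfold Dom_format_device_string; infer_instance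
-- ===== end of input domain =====

-- B replaces A's per-character state machine by a two-pass algorithm: collect the
-- state-changing positions first, then upper/lower/copy whole chunks between them
-- (alternative decomposition, same cost).

-- ===== PORT A =====
-- change_case update of A's loop body: pfx is device_string[i:i+2], c is device_string[i]
def fdsStateA (pfx : List Char) (c : Char) (cc : Int) : Int :=
  if pfx = ['m', 'a'] then 0
  else if pfx = ['M', 'A'] ∨ pfx = ['M', 'a'] ∨ pfx = ['m', 'A'] then -1
  else if cc ≠ 1 ∧ c = ',' then 1
  else cc

-- the character appended by one loop iteration (upper / lower / unchanged)
def fdsEmit (cc : Int) (c : Char) : List Char :=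
  if cc = 1 then PySem.Chars.upper [c]
  else if cc = -1 then PySem.Chars.lower [c]
  else [c]

-- A's loop over i in range(len(s)): at index i the prefix s[i:i+2] is the head plus a
-- one-char lookahead, and one character is appended per step.
def fdsLoopA : List Char → Int → List Char
  | [], _ => []
  | c :: rest, cc =>
    fdsEmit (fdsStateA (c :: rest.take 1) c cc) c ++
      fdsLoopA rest (fdsStateA (c :: rest.take 1) c cc)

def format_device_string (device_string : String) : String :=
  String.ofList (fdsLoopA device_string.toList 1)

-- ===== PORT B =====
-- Source B's _apply: transform a whole chunk according to the mode in force
def fdsApply (mode : Int) (chunk : List Char) : List Char :=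
  if mode = 1 then PySem.Chars.upper chunk
  else if mode = -1 then PySem.Chars.lower chunk
  else chunk

-- Source B pass 1: the list of (position, new mode) marks; the loop appending to a list
-- under two-way branching is a filterMap over range(len(s))
def fdsMarks (s : List Char) : List (Nat × Int) :=
  (List.range s.length).filterMap (fun (i : Nat) =>
    let pair := PySem.List.slice s (some (i : Int)) (some ((i : Int) + 2))
    if pair = ['m', 'a'] then some (i, 0)
    else if pair = ['M', 'A'] ∨ pair = ['M', 'a'] ∨ pair = ['m', 'A'] then some (i, -1)
    else if PySem.List.pyGet? s (i : Int) = some ',' then some (i, 1)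
    else none)

-- Source B pass 2: fold over the marks with (prev, mode) state, one whole slice per chunk
def fdsBuild (s : List Char) : List (Nat × Int) → Nat → Int → List Char
  | [], prev, mode => fdsApply mode (PySem.List.slice s (some (prev : Int)) none)
  | (m, md) :: ms, prev, mode =>
      fdsApply mode (PySem.List.slice s (some (prev : Int)) (some (m : Int))) ++
        fdsBuild s ms m md

def format_device_string_alt (device_string : String) : String :=
  String.ofList (fdsBuild device_string.toList (fdsMarks device_string.toList) 0 1)

-- ===== PRECONDITION & SPEC =====
def Spec_format_device_string (device_string : String) (out : String) : Prop := out = format_device_string_alt device_string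
instance (device_string : String) (out : String) : Decidable (Spec_format_device_string device_string out) := by unfold Spec_format_device_string; infer_instance

-- ===== CLAIM (what is proved, stated in full; the proofs are below) =====
def Claim_equal_format_device_string : Prop := ∀ (device_string : String), Dom_format_device_string device_string → Spec_format_device_string device_string (format_device_string device_string)

-- ===== LEMMAS AND PROOFS =====

-- the mode set (if any) by the mark whose pair/char sits at the head of cs
def fdsModeHead (cs : List Char) : Option Int :=
  if cs.take 2 = ['m', 'a'] then some 0
  else if cs.take 2 = ['M', 'A'] ∨ cs.take 2 = ['M', 'a'] ∨ cs.take 2 = ['m', 'A'] then some (-1)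
  else if cs.take 1 = [','] then some 1
  else none

-- one state-update step of A's loop, seen from the suffix being processed
def fdsStep (cs : List Char) (cc : Int) : Int :=
  match cs with
  | [] => cc
  | c :: rest => fdsStateA (c :: rest.take 1) c cc

theorem fdsApply_nil (mode : Int) : fdsApply mode [] = [] := by
  unfold fdsApply; split_ifs <;> simp [PySem.Chars.upper, PySem.Chars.lower]

theorem fdsApply_cons (mode : Int) (c : Char) (l : List Char) :
    fdsApply mode (c :: l) = fdsEmit mode c ++ fdsApply mode l := by
  unfold fdsApply fdsEmit
  split_ifs <;> simp [PySem.Chars.upper, PySem.Chars.lower]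

-- a non-mark position leaves any incoming state unchanged
theorem fdsStep_of_none (cs : List Char) (cc : Int) (h : fdsModeHead cs = none) :
    fdsStep cs cc = cc := by
  cases cs with
  | nil => rfl
  | cons c rest =>
    unfold fdsModeHead at h
    simp only [List.take_succ_cons, List.take_zero] at h
    split_ifs at h with h1 h2 h3
    have hc : c ≠ ',' := by
      intro hc; exact h3 (by rw [hc])
    show fdsStateA (c :: rest.take 1) c cc = cc
    unfold fdsStateA
    rw [if_neg h1, if_neg h2, if_neg (fun hand => hc hand.2)]

-- a mark position drives any incoming state to the mark's mode
theorem fdsStep_of_some (cs : List Char) (cc md : Int) (h : fdsModeHead cs = some md) :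
    fdsStep cs cc = md := by
  cases cs with
  | nil => simp [fdsModeHead] at h
  | cons c rest =>
    unfold fdsModeHead at h
    simp only [List.take_succ_cons, List.take_zero] at h
    split_ifs at h with h1 h2 h3
    · rw [← Option.some.inj h]
      show fdsStateA (c :: rest.take 1) c cc = 0
      unfold fdsStateA; rw [if_pos h1]
    · rw [← Option.some.inj h]
      show fdsStateA (c :: rest.take 1) c cc = -1
      unfold fdsStateA; rw [if_neg h1, if_pos h2]
    · have hc : c = ',' := by
        cases rest <;> simp_all
      rw [← Option.some.inj h]
      show fdsStateA (c :: rest.take 1) c cc = 1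
      unfold fdsStateA
      rw [if_neg h1, if_neg h2]
      by_cases hcc : cc = 1
      · rw [if_neg (fun hand => hand.1 hcc), hcc]
      · rw [if_pos ⟨hcc, hc⟩]

-- a mark's pair cannot start with a comma, so drop m is nonempty at a mark
theorem modeHead_ne_nil (cs : List Char) (md : Int) (h : fdsModeHead cs = some md) :
    cs ≠ [] := by
  intro hnil; subst hnil; simp [fdsModeHead] at h

-- A's loop output from a mark onward does not depend on the incoming state
theorem loopA_head_some (cs : List Char) (cc cc' md : Int)
    (h : fdsModeHead cs = some md) : fdsLoopA cs cc = fdsLoopA cs cc' := by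
  cases cs with
  | nil => rfl
  | cons c rest =>
    have h1 : fdsStateA (c :: rest.take 1) c cc = md := fdsStep_of_some _ cc md h
    have h2 : fdsStateA (c :: rest.take 1) c cc' = md := fdsStep_of_some _ cc' md h
    rw [fdsLoopA, fdsLoopA, h1, h2]

-- CHUNK: while every step keeps the state cc, the loop uppercases/lowercases/copies
-- the k chars one at a time, which is fdsApply on the whole chunk
theorem loopA_chunk (k : Nat) : ∀ (cs : List Char) (cc : Int),
    (∀ j < k, fdsStep (cs.drop j) cc = cc) →
    fdsLoopA cs cc = fdsApply cc (cs.take k) ++ fdsLoopA (cs.drop k) cc := by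
  induction k with
  | zero => intro cs cc _; simp [fdsApply_nil]
  | succ k ih =>
    intro cs cc h
    cases cs with
    | nil => simp [fdsLoopA, fdsApply_nil]
    | cons c rest =>
      have h0 : fdsStateA (c :: rest.take 1) c cc = cc := h 0 (Nat.succ_pos k)
      rw [fdsLoopA, h0, List.take_succ_cons, fdsApply_cons, List.drop_succ_cons,
        ih rest cc (fun j hj => h (j + 1) (Nat.succ_lt_succ hj))]
      simp [List.append_assoc]

-- the heart: A's loop from position prev equals B's chunkwise build, given that the
-- mark list is exactly the set of marks at positions > prev (position prev itself may
-- be a mark already absorbed into mode)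
theorem loopA_eq_build (s : List Char) : ∀ (ms : List (Nat × Int)) (prev : Nat) (mode : Int),
    ms.Pairwise (fun a b => a.1 < b.1) →
    (∀ p ∈ ms, prev ≤ p.1 ∧ fdsModeHead (s.drop p.1) = some p.2) →
    (∀ j, prev ≤ j → fdsModeHead (s.drop j) ≠ none →
      j ∈ ms.map Prod.fst ∨ (j = prev ∧ fdsStep (s.drop prev) mode = mode)) →
    fdsLoopA (s.drop prev) mode = fdsBuild s ms prev mode := by
  intro ms
  induction ms with
  | nil =>
    intro prev mode _ _ hcomp
    have hstab : ∀ j < (s.drop prev).length, fdsStep ((s.drop prev).drop j) mode = mode := by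
      intro j _
      rw [List.drop_drop]
      cases hmh : fdsModeHead (s.drop (prev + j)) with
      | none => exact fdsStep_of_none _ mode hmh
      | some md =>
        rcases hcomp (prev + j) (Nat.le_add_right _ _) (by simp [hmh]) with hin | ⟨hj, hst⟩
        · simp at hin
        · have : j = 0 := by omega
          subst this; simpa using hst
    rw [loopA_chunk (s.drop prev).length (s.drop prev) mode hstab,
      List.take_length, List.drop_length]
    simp [fdsLoopA, fdsBuild, PySem.List.slice_from_natCast]
  | cons p ms ih =>
    obtain ⟨m, md⟩ := p
    intro prev mode hsort hmk hcomp
    obtain ⟨hprev_le, hm⟩ := hmk (m, md) List.mem_cons_self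
    have hms_gt : ∀ q ∈ ms, m < q.1 := fun q hq => (List.pairwise_cons.mp hsort).1 q hq
    -- the chunk [prev, m) is state-stable
    have hstab : ∀ j < m - prev, fdsStep ((s.drop prev).drop j) mode = mode := by
      intro j hj
      rw [List.drop_drop]
      cases hmh : fdsModeHead (s.drop (prev + j)) with
      | none => exact fdsStep_of_none _ mode hmh
      | some md' =>
        rcases hcomp (prev + j) (Nat.le_add_right _ _) (by simp [hmh]) with hin | ⟨hj0, hst⟩
        · simp only [List.map_cons, List.mem_cons, List.mem_map] at hin
          rcases hin with h1 | ⟨q, hq, hq1⟩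
          · omega
          · have := hms_gt q hq; omega
        · have : j = 0 := by omega
          subst this; simpa using hst
    have hdrop : (s.drop prev).drop (m - prev) = s.drop m := by
      rw [List.drop_drop]; congr 1; omega
    rw [loopA_chunk (m - prev) (s.drop prev) mode hstab, hdrop,
      loopA_head_some (s.drop m) mode md md hm]
    have hrec : fdsLoopA (s.drop m) md = fdsBuild s ms m md := by
      apply ih m md (List.pairwise_cons.mp hsort).2
      · intro q hq
        exact ⟨Nat.le_of_lt (hms_gt q hq), (hmk q (List.mem_cons_of_mem _ hq)).2⟩
      · intro j hmj hne
        rcases hcomp j (Nat.le_trans hprev_le hmj) hne with hin | ⟨hj0, _⟩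
        · simp only [List.map_cons, List.mem_cons] at hin
          rcases hin with h1 | h2
          · right; exact ⟨h1, fdsStep_of_some _ md md (h1 ▸ hm)⟩
          · left; exact h2
        · have : j = m := by omega
          right; exact ⟨this, fdsStep_of_some _ md md (this ▸ hm)⟩
    rw [hrec, fdsBuild, PySem.List.slice_natCast]

-- B's pass 1 computes exactly the fdsModeHead marks
theorem fdsMarks_eq (s : List Char) :
    fdsMarks s = (List.range s.length).filterMap
      (fun i => (fdsModeHead (s.drop i)).map (fun md => (i, md))) := by
  unfold fdsMarks
  apply List.filterMap_congr
  intro i hi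
  have hilen : i < s.length := List.mem_range.mp hi
  have hsl : PySem.List.slice s (some (i : Int)) (some ((i : Int) + 2)) = (s.drop i).take 2 := by
    have : ((i : Int) + 2) = ((i + 2 : Nat) : Int) := by push_cast; ring
    rw [this, PySem.List.slice_natCast]
    congr 1; omega
  have hget : (PySem.List.pyGet? s (i : Int) = some ',') ↔ ((s.drop i).take 1 = [',']) := by
    obtain ⟨c, t, hct⟩ := List.exists_cons_of_ne_nil (by simp [List.drop_eq_nil_iff]; omega :
      s.drop i ≠ [])
    have : s[i]? = some c := by rw [← List.head?_drop, hct]; rfl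
    simp [hct, this]
  simp only [hsl, fdsModeHead, hget]
  split_ifs <;> rfl

-- a mark has a pair/char at its head, hence lies inside the string
theorem modeHead_lt_length (s : List Char) (j : Nat) (md : Int)
    (h : fdsModeHead (s.drop j) = some md) : j < s.length := by
  by_contra hge
  have : s.drop j = [] := List.drop_eq_nil_iff.mpr (by omega)
  exact modeHead_ne_nil _ md h this

-- ===== VERDICT (by name: the statement is the Claim_ definition above) =====
theorem format_device_string_spec : Claim_equal_format_device_string := by
  intro s _
  unfold Spec_format_device_string format_device_string format_device_string_alt
  congr 1
  have h := loopA_eq_build s.toList (fdsMarks s.toList) 0 1 ?_ ?_ ?_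
  · simpa using h
  · rw [fdsMarks_eq]
    rw [List.pairwise_filterMap]
    apply List.Pairwise.imp ?_ (List.pairwise_lt_range)
    intro a b hab x hx y hy
    simp only [Option.map_eq_some_iff] at hx hy
    obtain ⟨_, _, rfl⟩ := hx; obtain ⟨_, _, rfl⟩ := hy
    simpa using hab
  · intro p hp
    rw [fdsMarks_eq] at hp
    simp only [List.mem_filterMap, Option.map_eq_some_iff] at hp
    obtain ⟨i, _, md, hmd, rfl⟩ := hp
    exact ⟨Nat.zero_le _, hmd⟩
  · intro j _ hne
    left
    cases hmh : fdsModeHead (s.toList.drop j) with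
    | none => exact absurd hmh hne
    | some md =>
      rw [fdsMarks_eq]
      simp only [List.map_filterMap, List.mem_filterMap]
      exact ⟨j, List.mem_range.mpr (modeHead_lt_length _ _ md hmh), by simp [hmh]⟩
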